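-- pv_equiv track=rewrite | github.com/kaedub/codesignal-solutions | Arcade/Intro/8_matrix_elements_sum.py | matrixElementsSum
-- ===== SOURCE A (Python) =====
-- def matrixElementsSum(matrix):
--     free_columns = []
--     price = 0
--     for row in matrix:
--         for i in range(len(row)):
--             if row[i] == 0:
--                 free_columns.append(i)
--             elif i not in free_columns:
--                 price += row[i]
--             else:
--                 continue
--     return price
-- ===== SOURCE B (Python) =====
-- def matrixElementsSum(matrix):
--     ncols = max((len(row) for row in matrix), default=0)
--     total = 0
--     for j in range(ncols):
--         for row in matrix:
--             if j < len(row):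
--                 if row[j] == 0:
--                     break
--                 total += row[j]
--     return total
-- ===== Notes on version B (the rewrite author's own statement) =====
-- stated objective: faster
-- what changed: Column-major traversal that breaks out of a column at the first zero, replacing A's row-major scan with a growing blocked-column list and its repeated linear membership tests.
import Mathlib
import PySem

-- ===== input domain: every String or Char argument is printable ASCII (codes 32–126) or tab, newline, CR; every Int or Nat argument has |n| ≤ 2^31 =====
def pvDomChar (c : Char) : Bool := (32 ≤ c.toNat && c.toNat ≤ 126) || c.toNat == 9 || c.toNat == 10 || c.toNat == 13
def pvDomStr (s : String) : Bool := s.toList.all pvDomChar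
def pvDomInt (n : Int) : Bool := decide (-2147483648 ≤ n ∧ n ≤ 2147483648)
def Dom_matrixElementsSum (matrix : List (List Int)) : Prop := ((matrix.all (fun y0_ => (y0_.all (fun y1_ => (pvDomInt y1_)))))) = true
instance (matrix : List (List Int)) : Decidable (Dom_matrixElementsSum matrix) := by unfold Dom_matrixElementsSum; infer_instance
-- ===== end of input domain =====

-- B replaces A's row-major scan with a blocked-column list by a column-major walk
-- that breaks at the first zero in a column (alternative decomposition, same result).

-- ===== PORT A =====
-- inner loop 'for i in range(len(row))' of A, carrying (free_columns, price) and the index i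
def pvGoRow (free : List Nat) (price : Int) (i : Nat) (row : List Int) : List Nat × Int :=
  match row with
  | [] => (free, price)
  | x :: xs =>
    if x = 0 then pvGoRow (free ++ [i]) price (i + 1) xs
    else if free.contains i then pvGoRow free price (i + 1) xs
    else pvGoRow free (price + x) (i + 1) xs

def matrixElementsSum (matrix : List (List Int)) : Int :=
  (matrix.foldl (fun st row => pvGoRow st.1 st.2 0 row) (([] : List Nat), (0 : Int))).2

-- ===== PORT B =====
-- inner loop of B: walk column j top to bottom, break at the first zero
def pvColWalk (j : Nat) (rows : List (List Int)) : Int :=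
  match rows with
  | [] => 0
  | row :: rest =>
    match row[j]? with
    | none => pvColWalk j rest
    | some x => if x = 0 then 0 else x + pvColWalk j rest

-- ncols = max((len(row) for row in matrix), default=0)
def pvNcols (matrix : List (List Int)) : Nat :=
  matrix.foldl (fun m r => max m r.length) 0

def matrixElementsSum_alt (matrix : List (List Int)) : Int :=
  (List.range (pvNcols matrix)).foldl (fun total j => total + pvColWalk j matrix) 0

-- ===== PRECONDITION & SPEC =====
def Spec_matrixElementsSum (matrix : List (List Int)) (out : Int) : Prop := out = matrixElementsSum_alt matrix
instance (matrix : List (List Int)) (out : Int) : Decidable (Spec_matrixElementsSum matrix out) := by unfold Spec_matrixElementsSum; infer_instance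

-- ===== CLAIM (what is proved, stated in full; the proofs are below) =====
def Claim_equal_matrixElementsSum : Prop := ∀ (matrix : List (List Int)), Dom_matrixElementsSum matrix → Spec_matrixElementsSum matrix (matrixElementsSum matrix)

-- ===== LEMMAS AND PROOFS =====

-- indices (offset by i) of the zero entries of a row
def pvZeros (i : Nat) (row : List Int) : List Nat :=
  match row with
  | [] => []
  | x :: xs => if x = 0 then i :: pvZeros (i + 1) xs else pvZeros (i + 1) xs

-- contribution of one row to the price, given the blocked columns `free`
def pvRowSum (free : List Nat) (i : Nat) (row : List Int) : Int :=
  match row with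
  | [] => 0
  | x :: xs => (if x = 0 ∨ free.contains i then 0 else x) + pvRowSum free (i + 1) xs

lemma pvZeros_mem (row : List Int) : ∀ (i j : Nat),
    j ∈ pvZeros i row ↔ i ≤ j ∧ row[j - i]? = some 0 := by
  induction row with
  | nil => intro i j; simp [pvZeros]
  | cons x xs ih =>
    intro i j
    by_cases hx : x = 0 <;> simp only [pvZeros, hx, if_true, if_false, List.mem_cons, ih (i+1) j] <;>
      constructor
    · rintro (rfl | ⟨h1, h2⟩)
      · simp
      · refine ⟨by omega, ?_⟩
        have : j - i = (j - (i+1)) + 1 := by omega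
        simp [this, h2]
    · rintro ⟨h1, h2⟩
      rcases Nat.eq_or_lt_of_le h1 with rfl | hlt
      · left; rfl
      · right
        refine ⟨by omega, ?_⟩
        have : j - i = (j - (i+1)) + 1 := by omega
        rw [this] at h2
        simpa using h2
    · rintro ⟨h1, h2⟩
      refine ⟨by omega, ?_⟩
      have : j - i = (j - (i+1)) + 1 := by omega
      simp [this, h2]
    · rintro ⟨h1, h2⟩
      rcases Nat.eq_or_lt_of_le h1 with rfl | hlt
      · simp at h2; omega
      · refine ⟨by omega, ?_⟩
        have : j - i = (j - (i+1)) + 1 := by omega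
        rw [this] at h2
        simpa using h2

-- characterisation of the inner loop of A
lemma pvGoRow_eq (row : List Int) : ∀ (free extra : List Nat) (price : Int) (i : Nat),
    (∀ z ∈ extra, z < i) →
    pvGoRow (free ++ extra) price i row
      = (free ++ extra ++ pvZeros i row, price + pvRowSum free i row) := by
  induction row with
  | nil => intro free extra price i _; simp [pvGoRow, pvZeros, pvRowSum]
  | cons x xs ih =>
    intro free extra price i hex
    have hmem : (free ++ extra).contains i = free.contains i := by
      simp only [List.contains_append, Bool.or_eq_left_iff_imp]
      intro h
      rcases List.contains_iff_mem.1 h with hm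
      exact absurd rfl (Nat.ne_of_lt (hex i hm)).symm
    by_cases hx : x = 0
    · subst hx
      have h1 : ∀ z ∈ extra ++ [i], z < i + 1 := by
        intro z hz
        rcases List.mem_append.1 hz with h | h
        · exact Nat.lt_succ_of_lt (hex z h)
        · simp at h; omega
      have := ih free (extra ++ [i]) price (i + 1) h1
      simp only [pvGoRow, if_true, List.append_assoc] at *
      rw [this]
      simp [pvZeros, pvRowSum]
    · by_cases hc : free.contains i
      · have := ih free extra price (i + 1) (fun z hz => Nat.lt_succ_of_lt (hex z hz))
        simp only [pvGoRow, hx, if_false, hmem, hc, if_true]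
        rw [this]
        have hc' : i ∈ free := by simpa [List.contains_iff_mem] using hc
        simp [pvZeros, pvRowSum, hx, hc']
      · have := ih free extra (price + x) (i + 1) (fun z hz => Nat.lt_succ_of_lt (hex z hz))
        simp only [pvGoRow, hx, if_false, hmem, hc]
        rw [this]
        have hc' : i ∉ free := by simpa [List.contains_iff_mem] using hc
        simp [pvZeros, pvRowSum, hx, hc']
        ring

-- per-column term of one row, seen through getElem?
def pvRowTerm (free : List Nat) (row : List Int) (j : Nat) : Int :=
  match row[j]? with
  | none => 0
  | some x => if x = 0 ∨ free.contains j then 0 else x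

lemma pvRowSum_eq_sum (row : List Int) : ∀ (free : List Nat),
    pvRowSum free 0 row
      = ∑ j ∈ Finset.range row.length, pvRowTerm free row j := by
  suffices h : ∀ (row : List Int) (free : List Nat) (i : Nat),
      pvRowSum free i row
        = ∑ k ∈ Finset.range row.length,
            (match row[k]? with
             | none => (0 : Int)
             | some x => if x = 0 ∨ free.contains (i + k) then 0 else x) by
    intro free
    rw [h row free 0]
    apply Finset.sum_congr rfl
    intro k _
    simp [pvRowTerm]
  intro row
  induction row with
  | nil => intro free i; simp [pvRowSum]
  | cons x xs ih =>
    intro free i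
    rw [pvRowSum, ih free (i + 1)]
    rw [List.length_cons, Finset.sum_range_succ']
    have : ∀ k, (match (x :: xs)[k + 1]? with
        | none => (0 : Int)
        | some y => if y = 0 ∨ free.contains (i + (k + 1)) then 0 else y)
      = (match xs[k]? with
        | none => (0 : Int)
        | some y => if y = 0 ∨ free.contains (i + 1 + k) then 0 else y) := by
      intro k
      have hidx : i + (k + 1) = i + 1 + k := by omega
      simp [hidx]
    simp only [this]
    have h0 : (match (x :: xs)[0]? with
        | none => (0 : Int)
        | some y => if y = 0 ∨ free.contains (i + 0) then 0 else y)
      = (if x = 0 ∨ free.contains i then 0 else x) := by simp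
    rw [h0]; ring

lemma pvRowTerm_none (free : List Nat) (row : List Int) (j : Nat) (h : row.length ≤ j) :
    pvRowTerm free row j = 0 := by
  simp [pvRowTerm, List.getElem?_eq_none h]

lemma pvRowSum_eq_sumN (row : List Int) (free : List Nat) (N : Nat) (hN : row.length ≤ N) :
    pvRowSum free 0 row = ∑ j ∈ Finset.range N, pvRowTerm free row j := by
  rw [pvRowSum_eq_sum]
  apply Finset.sum_subset
  · intro x hx
    exact Finset.mem_range.mpr (lt_of_lt_of_le (Finset.mem_range.mp hx) hN)
  · intro j _ hj
    exact pvRowTerm_none free row j (by simpa using hj)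

-- the key per-column step identity
lemma pvCol_step (free : List Nat) (row : List Int) (rest : List (List Int)) (j : Nat) :
    (if free.contains j then 0 else pvColWalk j (row :: rest))
      = pvRowTerm free row j
        + (if (free ++ pvZeros 0 row).contains j then 0 else pvColWalk j rest) := by
  have hz : j ∈ pvZeros 0 row ↔ row[j]? = some 0 := by
    simpa using pvZeros_mem row 0 j
  simp only [List.contains_append, List.contains_iff_mem, Bool.or_eq_true, pvRowTerm]
  by_cases hc : j ∈ free
  · cases h : row[j]? with
    | none => simp [hc]
    | some x => simp [hc]
  · cases h : row[j]? with
    | none =>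
      have hz' : j ∉ pvZeros 0 row := by rw [hz, h]; simp
      simp [pvColWalk, h, hc, hz']
    | some x =>
      by_cases hx : x = 0
      · subst hx
        have hz' : j ∈ pvZeros 0 row := hz.2 h
        simp [pvColWalk, h, hc, hz']
      · have hz' : j ∉ pvZeros 0 row := by rw [hz, h]; simpa using hx
        simp [pvColWalk, h, hc, hz', hx]

-- main invariant for A's fold over the rows
lemma pvMain (rows : List (List Int)) : ∀ (free : List Nat) (price : Int) (N : Nat),
    (∀ row ∈ rows, row.length ≤ N) →
    (rows.foldl (fun st row => pvGoRow st.1 st.2 0 row) (free, price)).2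
      = price + ∑ j ∈ Finset.range N, (if free.contains j then 0 else pvColWalk j rows) := by
  induction rows with
  | nil => intro free price N _; simp [pvColWalk]
  | cons row rest ih =>
    intro free price N hN
    have hrow : row.length ≤ N := hN row (by simp)
    have hgo := pvGoRow_eq row free [] price 0 (by simp)
    simp only [List.append_nil] at hgo
    rw [List.foldl_cons]
    show (rest.foldl (fun st row => pvGoRow st.1 st.2 0 row) (pvGoRow free price 0 row)).2 = _
    rw [hgo, ih (free ++ pvZeros 0 row) (price + pvRowSum free 0 row) N
          (fun r hr => hN r (by simp [hr]))]
    rw [pvRowSum_eq_sumN row free N hrow]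
    have hsum : (∑ j ∈ Finset.range N, (if free.contains j then (0 : Int) else pvColWalk j (row :: rest)))
        = ∑ j ∈ Finset.range N,
            (pvRowTerm free row j + (if (free ++ pvZeros 0 row).contains j then 0 else pvColWalk j rest)) :=
      Finset.sum_congr rfl (fun j _ => pvCol_step free row rest j)
    rw [hsum, Finset.sum_add_distrib]
    ring

lemma pvNcols_le (matrix : List (List Int)) : ∀ row ∈ matrix, row.length ≤ pvNcols matrix := by
  suffices h : ∀ (rows : List (List Int)) (acc : Nat),
      acc ≤ rows.foldl (fun m r => max m r.length) acc ∧
      ∀ row ∈ rows, row.length ≤ rows.foldl (fun m r => max m r.length) acc by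
    intro row hrow
    exact (h matrix 0).2 row hrow
  intro rows
  induction rows with
  | nil => intro acc; simp
  | cons r rs ih =>
    intro acc
    constructor
    · exact le_trans (le_max_left acc r.length) (ih (max acc r.length)).1
    · intro row hrow
      rcases List.mem_cons.1 hrow with rfl | h
      · exact le_trans (le_max_right acc row.length) (ih (max acc row.length)).1
      · exact (ih (max acc r.length)).2 row h

lemma pvFoldl_range_sum (g : Nat → Int) : ∀ (N : Nat),
    (List.range N).foldl (fun total j => total + g j) 0 = ∑ j ∈ Finset.range N, g j := by
  suffices h : ∀ (N : Nat) (init : Int),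
      (List.range N).foldl (fun total j => total + g j) init
        = init + ∑ j ∈ Finset.range N, g j by
    intro N; simpa using h N 0
  intro N
  induction N with
  | zero => intro init; simp
  | succ n ih =>
    intro init
    rw [List.range_succ, List.foldl_append, ih, Finset.sum_range_succ]
    simp [add_assoc]

-- ===== VERDICT (by name: the statement is the Claim_ definition above) =====
theorem matrixElementsSum_spec : Claim_equal_matrixElementsSum := by
  intro matrix _
  unfold Spec_matrixElementsSum matrixElementsSum matrixElementsSum_alt
  rw [pvMain matrix [] 0 (pvNcols matrix) (pvNcols_le matrix)]
  rw [pvFoldl_range_sum]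
  simp
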